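-- pv_equiv track=rewrite | github.com/ManishNool/Python_Projects | Web Page for a Python Program using Flask/app.py | process_paragraph
-- ===== SOURCE A (Python) =====
-- def process_paragraph(paragraph):
--     words = paragraph.split()
--     word_count = len(words)
--     word_details = {}
--
--     for idx, word in enumerate(words):
--         if word not in word_details:
--             word_details[word] = [idx, 1]
--         else:
--             word_details[word][1] += 1
--
--     return word_count, word_details
-- ===== SOURCE B (Python) =====
-- def process_paragraph(paragraph):
--     words = paragraph.split()
--     counts = {}
--     for w in words:
--         counts[w] = counts.get(w, 0) + 1
--     first_index = {}
--     for idx, w in enumerate(words):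
--         first_index.setdefault(w, idx)
--     word_details = {w: [first_index[w], counts[w]] for w in counts}
--     return len(words), word_details
-- ===== Notes on version B (the rewrite author's own statement) =====
-- stated objective: alternative
-- what changed: A's single fused pass that builds and mutates [first_index, count] entries in one dict is replaced by three separate passes: a count table, a first-index table built with setdefault, and a final comprehension assembling {w: [first_index[w], counts[w]]}.
import Mathlib
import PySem

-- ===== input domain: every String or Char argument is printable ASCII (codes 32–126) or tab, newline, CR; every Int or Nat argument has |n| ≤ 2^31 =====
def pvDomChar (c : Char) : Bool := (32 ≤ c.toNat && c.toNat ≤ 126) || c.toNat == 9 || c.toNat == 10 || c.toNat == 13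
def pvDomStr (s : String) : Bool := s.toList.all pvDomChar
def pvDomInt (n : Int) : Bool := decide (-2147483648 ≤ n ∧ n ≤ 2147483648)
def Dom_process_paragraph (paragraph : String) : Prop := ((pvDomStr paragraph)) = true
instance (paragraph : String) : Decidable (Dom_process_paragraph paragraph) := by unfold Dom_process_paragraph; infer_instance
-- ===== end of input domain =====

-- B replaces A's single fused pass (dict of [first_index, count] updated in place) by three
-- separate passes — a count table, a first-index table, then an assembly comprehension —
-- an 'alternative' decomposition of the same cost; return values proved equal.

-- ===== PORT A =====
-- loop body: 'word_details[word] = [idx, 1]' / 'word_details[word][1] += 1'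
-- (the in-place list mutation is ported as an overwrite at the same key; index 1 always exists)
def pvStepA (d : PySem.Dict String (List Int)) (p : Int × String) : PySem.Dict String (List Int) :=
  if d.contains p.2 then
    d.insert p.2 ((d.getD p.2 []).set 1 ((d.getD p.2 []).getD 1 0 + 1))
  else
    d.insert p.2 [p.1, 1]

def process_paragraph (paragraph : String) : Int × (List (String × List Int)) :=
  let words := PySem.Str.split₀ paragraph
  let word_count : Int := words.length
  let word_details := (PySem.List.enumerate words 0).foldl pvStepA PySem.Dict.empty
  (word_count, word_details.items)

-- ===== PORT B =====
-- 'counts[w] = counts.get(w, 0) + 1'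
def pvStepCount (d : PySem.Dict String Int) (w : String) : PySem.Dict String Int :=
  d.insert w (d.getD w 0 + 1)

-- 'first_index.setdefault(w, idx)'
def pvStepFI (d : PySem.Dict String Int) (p : Int × String) : PySem.Dict String Int :=
  d.setdefault p.2 p.1

def process_paragraph_alt (paragraph : String) : Int × (List (String × List Int)) :=
  let words := PySem.Str.split₀ paragraph
  let counts := words.foldl pvStepCount PySem.Dict.empty
  let first_index := (PySem.List.enumerate words 0).foldl pvStepFI PySem.Dict.empty
  -- '{w: [first_index[w], counts[w]] for w in counts}' (first_index[w] always present; getD is its total form)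
  let word_details := counts.keys.foldl
    (fun d w => d.insert w [first_index.getD w 0, counts.getD w 0]) PySem.Dict.empty
  ((words.length : Int), word_details.items)

-- ===== PRECONDITION & SPEC =====
def Spec_process_paragraph (paragraph : String) (out : Int × (List (String × List Int))) : Prop := out = process_paragraph_alt paragraph
instance (paragraph : String) (out : Int × (List (String × List Int))) : Decidable (Spec_process_paragraph paragraph out) := by unfold Spec_process_paragraph; infer_instance

-- ===== CLAIM (what is proved, stated in full; the proofs are below) =====
def Claim_equal_process_paragraph : Prop := ∀ (paragraph : String), Dom_process_paragraph paragraph → Spec_process_paragraph paragraph (process_paragraph paragraph)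

-- ===== LEMMAS AND PROOFS =====

theorem pv_idxOf_append_of_not_mem (x : String) (l m : List String) (h : x ∉ l) :
    (l ++ m).idxOf x = l.length + m.idxOf x := by
  induction l with
  | nil => simp
  | cons a l ih =>
    simp only [List.mem_cons, not_or] at h
    rw [List.cons_append, List.idxOf_cons_ne _ (fun e => h.1 e.symm), ih h.2]
    simp only [List.length_cons]
    omega

theorem pv_set_add_of_mem (s : PySem.Set String) (x : String) (h : x ∈ s) : s.add x = s := by
  simp [PySem.Set.add, PySem.Set.contains, h]

theorem pv_set_add_of_not_mem (s : PySem.Set String) (x : String) (h : x ∉ s) :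
    s.add x = s ++ [x] := by
  simp [PySem.Set.add, PySem.Set.contains, h]

-- the first-index loop: what first_index.get? returns after folding over enumerate ws s
theorem pv_fi_get? (ws : List String) (s : Int) (d : PySem.Dict String Int) (x : String) :
    ((PySem.List.enumerate ws s).foldl pvStepFI d).get? x =
      if d.contains x then d.get? x
      else if x ∈ ws then some (s + (ws.idxOf x : Int)) else none := by
  induction ws generalizing s d with
  | nil =>
    simp only [PySem.List.enumerate_nil, List.foldl_nil, List.not_mem_nil, if_false]
    split_ifs with h
    · rfl
    · exact (PySem.Dict.get?_eq_none_iff_contains d x).2 (by simpa using h)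
  | cons w ws ih =>
    rw [PySem.List.enumerate_cons]
    simp only [List.foldl_cons]
    rw [ih]
    simp only [pvStepFI]
    by_cases hxw : x = w
    · subst hxw
      have hc : (d.setdefault x s).contains x = true := by
        simp [PySem.Dict.contains_setdefault]
      rw [if_pos hc, PySem.Dict.get?_setdefault_self]
      by_cases hdx : d.contains x = true
      · rw [if_pos hdx]
        rcases hg : d.get? x with _ | v
        · exact absurd ((PySem.Dict.get?_eq_none_iff_contains d x).1 hg) (by simp [hdx])
        · simp
      · rw [if_neg hdx, if_pos (List.mem_cons_self), List.idxOf_cons_self]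
        have : d.get? x = none := (PySem.Dict.get?_eq_none_iff_contains d x).2 (by simpa using hdx)
        simp [this]
    · have hc : (d.setdefault w s).contains x = d.contains x := by
        simp [PySem.Dict.contains_setdefault, hxw]
      rw [hc, PySem.Dict.get?_setdefault_of_ne _ _ hxw]
      by_cases hdx : d.contains x = true
      · simp [hdx]
      · rw [if_neg hdx, if_neg hdx]
        have hmem : x ∈ w :: ws ↔ x ∈ ws := by simp [List.mem_cons, hxw]
        by_cases hm : x ∈ ws
        · rw [if_pos hm, if_pos (hmem.2 hm)]
          rw [List.idxOf_cons_ne _ (fun e => hxw e.symm)]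
          congr 1
          push_cast
          ring
        · rw [if_neg hm, if_neg (fun h => hm (hmem.1 h))]

-- the fused A loop: its items are one entry per distinct word, [s + first index, count]
theorem pv_a_items (ws : List String) (s : Int) :
    ((PySem.List.enumerate ws s).foldl pvStepA PySem.Dict.empty).items =
      (PySem.Set.ofList ws).map
        (fun w => (w, [s + (ws.idxOf w : Int), (ws.count w : Int)])) := by
  induction ws using List.reverseRecOn with
  | nil => simp [PySem.List.enumerate_nil, PySem.Set.ofList, PySem.Set.empty,
      PySem.Dict.empty]
  | append_singleton ws w ih =>
    rw [PySem.List.enumerate_append, List.foldl_append, PySem.List.enumerate_cons,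
        PySem.List.enumerate_nil, List.foldl_cons, List.foldl_nil]
    set D := (PySem.List.enumerate ws s).foldl pvStepA PySem.Dict.empty with hD
    have hkeys : D.keys = PySem.Set.ofList ws := by
      show D.items.map (·.1) = _
      rw [ih, List.map_map]
      simp [Function.comp_def]
    have hnd : D.keys.Nodup := by rw [hkeys]; exact PySem.Set.nodup_ofList ws
    have hcont : D.contains w = decide (w ∈ ws) := by
      rw [PySem.Dict.contains_eq_decide_mem_keys, hkeys]
      simp [PySem.Set.mem_ofList]
    by_cases hmem : w ∈ ws
    · -- repeated word: overwrite bumps the count, first index unchanged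
      have hc : D.contains w = true := by simp [hcont, hmem]
      have hitem : (w, [s + (ws.idxOf w : Int), (ws.count w : Int)]) ∈ D.items := by
        rw [ih]
        exact List.mem_map_of_mem ((PySem.Set.mem_ofList ws w).2 hmem)
      have hget : D.getD w [] = [s + (ws.idxOf w : Int), (ws.count w : Int)] :=
        PySem.Dict.getD_of_mem_items D hitem hnd []
      simp only [pvStepA, hc, if_true]
      rw [PySem.Dict.items_insert_of_contains D _ hc, ih, List.map_map, hget]
      rw [PySem.Set.ofList_append, PySem.Set.update_cons, PySem.Set.update_nil,
          pv_set_add_of_mem _ _ ((PySem.Set.mem_ofList ws w).2 hmem)]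
      apply List.map_congr_left
      intro x hx
      have hxws : x ∈ ws := (PySem.Set.mem_ofList ws x).1 hx
      by_cases hxw : x = w
      · subst hxw
        have hcnt : List.count x (ws ++ [x]) = List.count x ws + 1 := by
          have h1 : List.count x [x] = 1 := by simp
          rw [List.count_append, h1]
        simp only [Function.comp_apply, beq_self_eq_true, if_true]
        rw [List.idxOf_append_of_mem hxws, hcnt]
        simp only [List.set_cons_succ, List.set_cons_zero, List.getD_cons_succ,
          List.getD_cons_zero]
        rw [show ((List.count x ws + 1 : Nat) : Int) = (List.count x ws : Int) + 1 by
          push_cast; ring]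
      · have hbeq : (x == w) = false := by simp [hxw]
        have hcnt : List.count x (ws ++ [w]) = List.count x ws := by
          rw [List.count_append,
            List.count_eq_zero_of_not_mem (show x ∉ [w] by simp [hxw])]
          omega
        simp only [Function.comp_apply, hbeq, Bool.false_eq_true, if_false]
        rw [List.idxOf_append_of_mem hxws, hcnt]
    · -- new word: appended with index s + |ws| and count 1
      have hc : D.contains w = false := by simp [hcont, hmem]
      simp only [pvStepA, hc, Bool.false_eq_true, if_false]
      rw [PySem.Dict.items_insert_of_not_contains D _ hc, ih]
      rw [PySem.Set.ofList_append, PySem.Set.update_cons, PySem.Set.update_nil,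
          pv_set_add_of_not_mem _ _ (fun h => hmem ((PySem.Set.mem_ofList ws w).1 h))]
      rw [List.map_append]
      congr 1
      · apply List.map_congr_left
        intro x hx
        have hxws : x ∈ ws := (PySem.Set.mem_ofList ws x).1 hx
        have hxw : x ≠ w := fun e => hmem (e ▸ hxws)
        have hcnt : List.count x (ws ++ [w]) = List.count x ws := by
          rw [List.count_append,
            List.count_eq_zero_of_not_mem (show x ∉ [w] by simp [hxw])]
          omega
        rw [List.idxOf_append_of_mem hxws, hcnt]
      · simp only [List.map_cons, List.map_nil]
        have hidx : List.idxOf w (ws ++ [w]) = ws.length := by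
          rw [pv_idxOf_append_of_not_mem w ws [w] hmem, List.idxOf_cons_self]
          omega
        have hcnt : List.count w (ws ++ [w]) = 1 := by
          have h1 : List.count w [w] = 1 := by simp
          rw [List.count_append, List.count_eq_zero_of_not_mem hmem, h1]
        rw [hidx, hcnt]
        norm_num

theorem pv_items_build (l : List String) (fiD cD : String → Int) (hnd : l.Nodup) :
    (l.foldl (fun d w => d.insert w [fiD w, cD w]) PySem.Dict.empty).items =
      l.map (fun w => (w, [fiD w, cD w])) := by
  have h := PySem.Dict.items_foldl_insert_fresh l (fun w => w)
    (fun w => [fiD w, cD w]) PySem.Dict.empty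
    (fun a _ => PySem.Dict.contains_empty a) (by simpa using hnd)
  simpa [PySem.Dict.items, PySem.Dict.empty] using h

-- ===== VERDICT (by name: the statement is the Claim_ definition above) =====
theorem process_paragraph_spec : Claim_equal_process_paragraph := by
  intro paragraph _
  unfold Spec_process_paragraph process_paragraph process_paragraph_alt
  set ws := PySem.Str.split₀ paragraph with hws
  simp only
  refine Prod.ext rfl ?_
  -- B's count loop is Counter(words)
  have hcounts : List.foldl pvStepCount PySem.Dict.empty ws = PySem.Dict.counter ws :=
    PySem.Dict.foldl_insert_getD_add_one_eq_counter ws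
  rw [hcounts, PySem.Dict.keys_counter]
  -- B's assembly loop over the distinct words appends one fresh entry per word
  rw [pv_items_build (PySem.Set.ofList ws) _ _ (PySem.Set.nodup_ofList ws)]
  rw [pv_a_items ws 0]
  apply List.map_congr_left
  intro x hx
  have hxws : x ∈ ws := (PySem.Set.mem_ofList ws x).1 hx
  have hfi : ((PySem.List.enumerate ws 0).foldl pvStepFI PySem.Dict.empty).getD x 0 =
      0 + (ws.idxOf x : Int) := by
    rw [PySem.Dict.getD_eq_get?_getD, pv_fi_get?]
    simp [PySem.Dict.contains_empty, hxws]
  rw [hfi, PySem.Dict.getD_counter]
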